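-- pv_equiv track=rewrite | github.com/brcsnt/mycoderepository_LLM | complaint_chatbot/modules/categorizer.py | _find_closest_category
-- ===== SOURCE A (Python) =====
-- def _find_closest_category(kategori: str, categories: list) -> str:
--     """En yakın kategoriyi bul (basit string matching)"""
--     kategori_lower = kategori.lower()
--
--     # Tam eşleşme (case-insensitive)
--     for cat in categories:
--         if cat.lower() == kategori_lower:
--             return cat
--
--     # Kısmi eşleşme
--     for cat in categories:
--         if kategori_lower in cat.lower() or cat.lower() in kategori_lower:
--             return cat
--
--     # Hiçbiri eşleşmezse ilk kategori
--     return categories[0]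
-- ===== SOURCE B (Python) =====
-- def _find_closest_category(kategori: str, categories: list) -> str:
--     """Single pass: exact match returns immediately; first partial match is remembered."""
--     kategori_lower = kategori.lower()
--     first_partial = None
--     for cat in categories:
--         cat_lower = cat.lower()
--         if cat_lower == kategori_lower:
--             return cat
--         if first_partial is None and (kategori_lower in cat_lower or cat_lower in kategori_lower):
--             first_partial = cat
--     return first_partial if first_partial is not None else categories[0]
-- ===== Notes on version B (the rewrite author's own statement) =====
-- stated objective: alternative
-- what changed: Replaced A's two sequential scans (exact-match loop, then partial-match loop) by a single pass that returns on an exact match and remembers the first partial match in an accumulator.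
import Mathlib
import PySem

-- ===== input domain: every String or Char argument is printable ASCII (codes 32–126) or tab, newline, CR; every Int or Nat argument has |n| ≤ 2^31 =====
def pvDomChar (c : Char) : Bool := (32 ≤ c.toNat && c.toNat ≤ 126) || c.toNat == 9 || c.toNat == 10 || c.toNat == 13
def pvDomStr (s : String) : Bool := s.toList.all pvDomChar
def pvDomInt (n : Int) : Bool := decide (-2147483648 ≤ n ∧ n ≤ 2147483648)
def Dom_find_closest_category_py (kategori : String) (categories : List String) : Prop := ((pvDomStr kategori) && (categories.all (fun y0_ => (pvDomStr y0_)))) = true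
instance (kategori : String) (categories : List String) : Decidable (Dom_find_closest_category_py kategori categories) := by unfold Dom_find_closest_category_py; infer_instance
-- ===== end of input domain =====

-- B replaces A's two sequential scans by a single pass keeping a first-partial accumulator (alternative decomposition, same cost).


-- ===== PORT A =====
-- first loop: exact case-insensitive match
def pvA_exact (kl : String) : List String → Option String
  | [] => none
  | cat :: rest => if PySem.Str.lower cat == kl then some cat else pvA_exact kl rest

-- second loop: partial match either direction
def pvA_partial (kl : String) : List String → Option String
  | [] => none
  | cat :: rest =>
    if PySem.Str.isIn kl (PySem.Str.lower cat) || PySem.Str.isIn (PySem.Str.lower cat) kl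
    then some cat else pvA_partial kl rest

def find_closest_category_py (kategori : String) (categories : List String) : String :=
  let kl := PySem.Str.lower kategori
  match pvA_exact kl categories with
  | some cat => cat
  | none =>
    match pvA_partial kl categories with
    | some cat => cat
    | none => (PySem.List.pyGet? categories 0).getD ""  -- none = IndexError, excluded by Pre_

-- ===== PORT B =====
-- single pass: return on exact match, remember the first partial match in fp
def pvB_loop (kl : String) : List String → Option String → Option String
  | [], fp => fp
  | cat :: rest, fp =>
    let cl := PySem.Str.lower cat
    if cl == kl then some cat
    else pvB_loop kl rest
      (if fp.isNone && (PySem.Str.isIn kl cl || PySem.Str.isIn cl kl) then some cat else fp)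

def find_closest_category_py_alt (kategori : String) (categories : List String) : String :=
  match pvB_loop (PySem.Str.lower kategori) categories none with
  | some cat => cat
  | none => (PySem.List.pyGet? categories 0).getD ""  -- none = IndexError, excluded by Pre_

-- ===== PRECONDITION & SPEC =====
-- A raises IndexError exactly when categories is empty (both loops find nothing and categories[0] raises).
def Pre_find_closest_category_py (kategori : String) (categories : List String) : Prop := categories ≠ []
instance (kategori : String) (categories : List String) : Decidable (Pre_find_closest_category_py kategori categories) := by unfold Pre_find_closest_category_py; infer_instance
def pvWitness_find_closest_category_py : String × List String := ("Fatura", ["fatura", "internet"])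

def Spec_find_closest_category_py (kategori : String) (categories : List String) (out : String) : Prop := out = find_closest_category_py_alt kategori categories
instance (kategori : String) (categories : List String) (out : String) : Decidable (Spec_find_closest_category_py kategori categories out) := by unfold Spec_find_closest_category_py; infer_instance

-- ===== CLAIM (what is proved, stated in full; the proofs are below) =====
def Claim_equal_find_closest_category_py : Prop := ∀ (kategori : String) (categories : List String), Dom_find_closest_category_py kategori categories → Pre_find_closest_category_py kategori categories → Spec_find_closest_category_py kategori categories (find_closest_category_py kategori categories)

-- ===== LEMMAS AND PROOFS =====
-- invariant of B's single pass: it computes (first exact) <|> (accumulator <|> first partial)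
theorem pvB_loop_eq (kl : String) (l : List String) (fp : Option String) :
    pvB_loop kl l fp = (pvA_exact kl l).or (fp.or (pvA_partial kl l)) := by
  induction l generalizing fp with
  | nil => simp [pvB_loop, pvA_exact, pvA_partial]
  | cons cat rest ih =>
    simp only [pvB_loop, pvA_exact, pvA_partial]
    by_cases hx : PySem.Str.lower cat == kl
    · simp [hx]
    · simp only [hx, ih]
      cases fp <;> simp <;> split_ifs <;> simp

-- ===== VERDICT (by name: the statement is the Claim_ definition above) =====
theorem find_closest_category_py_spec : Claim_equal_find_closest_category_py := by
  intro kategori categories _ _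
  unfold Spec_find_closest_category_py find_closest_category_py find_closest_category_py_alt
  rw [pvB_loop_eq]
  cases hA : pvA_exact (PySem.Str.lower kategori) categories <;>
    cases hB : pvA_partial (PySem.Str.lower kategori) categories <;> simp [hA, hB, Option.or]
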